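-- pv_equiv track=rewrite | github.com/realyixuan/Doraemon | generate_diary_pdf/diary_pdf_generator.py | split_line_to_word
-- ===== SOURCE A (Python) =====
-- def split_line_to_word(line):
--     words = []
--     def is_ascii_word(char): return ord(char) < 128
--     i = 0
--     while i < len(line):
--         if not is_ascii_word(line[i]):
--             words.append(line[i])
--         else:
--             if line[i].isalnum():
--                 j = i
--                 while i < len(line):
--                     if not line[i].isalnum():
--                         i -= 1
--                         break
--                     i += 1
--                 words.append(line[j:i+1])
--             else:
--                 words.append(line[i])
--
--         i += 1
--     return words
-- ===== SOURCE B (Python) =====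
-- def split_line_to_word(line):
--     words = []
--     buf = ""
--     for c in line:
--         if buf:
--             if c.isalnum():
--                 buf += c
--             else:
--                 words.append(buf)
--                 buf = ""
--                 words.append(c)
--         else:
--             if ord(c) < 128 and c.isalnum():
--                 buf = c
--             else:
--                 words.append(c)
--     if buf:
--         words.append(buf)
--     return words
-- ===== Notes on version B (the rewrite author's own statement) =====
-- stated objective: simpler
-- what changed: Replaced the index-juggling outer/inner while loops with backtracking and slicing by one flat pass over the characters that maintains a current word buffer and flushes it on non-alnum characters.
import Mathlib
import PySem

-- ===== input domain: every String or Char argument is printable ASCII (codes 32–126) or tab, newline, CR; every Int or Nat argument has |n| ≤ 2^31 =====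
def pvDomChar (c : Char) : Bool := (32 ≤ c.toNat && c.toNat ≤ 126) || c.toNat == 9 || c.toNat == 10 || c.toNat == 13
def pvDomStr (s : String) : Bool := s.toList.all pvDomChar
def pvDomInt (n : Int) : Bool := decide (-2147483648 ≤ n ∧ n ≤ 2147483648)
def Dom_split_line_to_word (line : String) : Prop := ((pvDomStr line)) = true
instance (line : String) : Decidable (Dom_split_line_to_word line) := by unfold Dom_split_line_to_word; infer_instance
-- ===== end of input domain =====

-- B replaces A's index-juggling nested while loops (with backtracking and slicing)
-- by one flat pass maintaining a current word buffer; objective: simpler.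


-- ===== PORT A =====
-- A's inner while loop: advances i while line[i].isalnum(); the 'i -= 1; break'
-- returns i-1 at the first non-alnum char; returns len(line) if the run reaches the end.
-- (PySem.Chars.isalnum is exact on the ASCII domain.)
def aInner (cs : List Char) (i : Nat) : Nat :=
  if h : i < cs.length then
    if ¬ PySem.Chars.isalnum cs[i] then i - 1
    else aInner cs (i + 1)
  else i
termination_by cs.length - i

-- needed by aOuter's termination: the inner loop never moves i backwards past its start
theorem aInner_ge (cs : List Char) (i : Nat) : i - 1 ≤ aInner cs i := by
  induction' hn : cs.length - i using Nat.strong_induction_on with n ih generalizing i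
  subst hn
  rw [aInner]
  by_cases h : i < cs.length
  · simp only [dif_pos h]
    by_cases ha : PySem.Chars.isalnum cs[i]
    · simp only [ha, not_true, ite_false]
      have := ih (cs.length - (i + 1)) (by omega) (i + 1) rfl
      omega
    · simp [ha]
  · simp [h]

-- A's outer while loop over the index i, carrying the accumulated words list.
-- line[j:i'+1] with 0 ≤ j ≤ i'+1 equals drop/take (exact here: nonneg bounds, clamped alike).
def aOuter (cs : List Char) (i : Nat) (words : List String) : List String :=
  if h : i < cs.length then
    if ¬ (cs[i].toNat < 128) then
      aOuter cs (i + 1) (words ++ [String.ofList [cs[i]]])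
    else if ha : PySem.Chars.isalnum cs[i] then
      aOuter cs (aInner cs i + 1) (words ++ [String.ofList ((cs.drop i).take (aInner cs i + 1 - i))])
    else
      aOuter cs (i + 1) (words ++ [String.ofList [cs[i]]])
  else words
termination_by cs.length - i
decreasing_by
  · omega
  · have h2 : i ≤ aInner cs i := by
      rw [aInner]; simp only [dif_pos h, ha, not_true, ite_false]
      have := aInner_ge cs (i + 1); omega
    omega
  · omega

def split_line_to_word (line : String) : List String := aOuter line.toList 0 []

-- ===== PORT B =====
-- B's single flat loop: `buf` is the currently open word (empty = no word open).
def bLoop (cs : List Char) (buf : List Char) (words : List String) : List String :=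
  match cs with
  | [] => if buf.isEmpty then words else words ++ [String.ofList buf]
  | c :: rest =>
    if ¬ buf.isEmpty then
      if PySem.Chars.isalnum c then bLoop rest (buf ++ [c]) words
      else bLoop rest [] (words ++ [String.ofList buf, String.ofList [c]])
    else
      if c.toNat < 128 ∧ PySem.Chars.isalnum c then bLoop rest [c] words
      else bLoop rest [] (words ++ [String.ofList [c]])

def split_line_to_word_alt (line : String) : List String := bLoop line.toList [] []

-- ===== PRECONDITION & SPEC =====
def Spec_split_line_to_word (line : String) (out : List String) : Prop := out = split_line_to_word_alt line
instance (line : String) (out : List String) : Decidable (Spec_split_line_to_word line out) := by unfold Spec_split_line_to_word; infer_instance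

-- ===== CLAIM (what is proved, stated in full; the proofs are below) =====
def Claim_equal_split_line_to_word : Prop := ∀ (line : String), Dom_split_line_to_word line → Spec_split_line_to_word line (split_line_to_word line)

-- ===== LEMMAS AND PROOFS =====

-- flushing B's open buffer: the loop emits buf extended by the leading alnum run
theorem bLoop_flush (cs : List Char) :
    ∀ (buf : List Char) (words : List String), buf ≠ [] →
      bLoop cs buf words =
        bLoop (cs.dropWhile PySem.Chars.isalnum) []
          (words ++ [String.ofList (buf ++ cs.takeWhile PySem.Chars.isalnum)]) := by
  induction cs with
  | nil =>
    intro buf words hb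
    simp [bLoop, List.isEmpty_iff, hb]
  | cons c rest ih =>
    intro buf words hb
    have hbe : (¬ buf.isEmpty = true) := by simp [List.isEmpty_iff, hb]
    rw [bLoop, if_pos hbe]
    by_cases ha : PySem.Chars.isalnum c
    · rw [if_pos ha, ih (buf ++ [c]) words (by simp)]
      simp [ha]
    · have haf : PySem.Chars.isalnum c = false := by simpa using ha
      rw [if_neg ha, List.dropWhile_cons, List.takeWhile_cons, haf]
      simp only [Bool.false_eq_true, if_false]
      rw [bLoop]
      rw [if_neg (by simp), if_neg (by simp [haf])]
      simp

-- characterisation of A's inner loop against takeWhile/dropWhile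
theorem aInner_char (cs : List Char) (i : Nat) (h : i < cs.length)
    (ha : PySem.Chars.isalnum cs[i]) :
    cs.drop (aInner cs i + 1) = (cs.drop (i + 1)).dropWhile PySem.Chars.isalnum ∧
    (cs.drop i).take (aInner cs i + 1 - i)
      = cs[i] :: (cs.drop (i + 1)).takeWhile PySem.Chars.isalnum := by
  induction' hn : cs.length - i using Nat.strong_induction_on with n ih generalizing i
  subst hn
  have hstep : aInner cs i = aInner cs (i + 1) := by
    rw [aInner]; simp only [dif_pos h, ha, not_true, ite_false]
  have hdropi : cs.drop i = cs[i] :: cs.drop (i + 1) := List.drop_eq_getElem_cons h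
  by_cases h1 : i + 1 < cs.length
  · have hd1 : cs.drop (i + 1) = cs[i + 1] :: cs.drop (i + 1 + 1) := List.drop_eq_getElem_cons h1
    by_cases ha1 : PySem.Chars.isalnum cs[i + 1]
    · have ih1 := ih (cs.length - (i + 1)) (by omega) (i + 1) h1 ha1 rfl
      have hge : i + 1 ≤ aInner cs (i + 1) := by
        rw [aInner]; simp only [dif_pos h1, ha1, not_true, ite_false]
        have := aInner_ge cs (i + 1 + 1); omega
      constructor
      · rw [hstep, ih1.1]
        conv_rhs => rw [hd1, List.dropWhile_cons, if_pos ha1]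
      · rw [hstep, hdropi]
        have hk : aInner cs (i + 1) + 1 - i = (aInner cs (i + 1) + 1 - (i + 1)) + 1 := by omega
        rw [hk, List.take_succ_cons, ih1.2]
        conv_rhs => rw [hd1, List.takeWhile_cons, if_pos ha1]
    · have haf : PySem.Chars.isalnum cs[i + 1] = false := by simpa using ha1
      have hin1 : aInner cs (i + 1) = i := by
        rw [aInner]; rw [dif_pos h1, if_pos (by simp [haf])]
        omega
      constructor
      · rw [hstep, hin1]
        conv_rhs => rw [hd1, List.dropWhile_cons, if_neg (by simp [haf])]
        exact hd1
      · rw [hstep, hin1, hdropi]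
        conv_rhs => rw [hd1, List.takeWhile_cons, if_neg (by simp [haf])]
        have h1' : i + 1 - i = 1 := by omega
        rw [h1', List.take_succ_cons, List.take_zero]
  · -- the run reaches the end of the string: inner loop exits with i = len
    have hin1 : aInner cs (i + 1) = i + 1 := by
      rw [aInner]; rw [dif_neg (by omega)]
    have hd1 : cs.drop (i + 1) = [] := List.drop_of_length_le (by omega)
    constructor
    · rw [hstep, hin1, hd1]
      simp [List.drop_of_length_le, (by omega : cs.length ≤ i + 1 + 1)]
    · rw [hstep, hin1, hdropi, hd1]
      have h2 : i + 1 + 1 - i = 2 := by omega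
      rw [h2]
      simp

-- A's outer loop equals B's loop on the remaining characters
theorem aOuter_bLoop (cs : List Char) (i : Nat) (words : List String) :
    aOuter cs i words = bLoop (cs.drop i) [] words := by
  induction' hn : cs.length - i using Nat.strong_induction_on with n ih generalizing i words
  subst hn
  rw [aOuter]
  by_cases h : i < cs.length
  · have hdropi : cs.drop i = cs[i] :: cs.drop (i + 1) := List.drop_eq_getElem_cons h
    rw [dif_pos h]
    by_cases hascii : cs[i].toNat < 128
    · by_cases ha : PySem.Chars.isalnum cs[i]
      · rw [if_neg (by simpa using hascii), dif_pos ha]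
        have hc := aInner_char cs i h ha
        have hge : i ≤ aInner cs i := by
          rw [aInner]; simp only [dif_pos h, ha, not_true, ite_false]
          have := aInner_ge cs (i + 1); omega
        rw [ih (cs.length - (aInner cs i + 1)) (by omega) _ _ rfl]
        rw [hc.1, hc.2, hdropi, bLoop]
        rw [if_neg (by simp), if_pos ⟨hascii, ha⟩]
        rw [bLoop_flush (cs.drop (i + 1)) [cs[i]] words (by simp)]
        simp
      · rw [if_neg (by simpa using hascii), dif_neg ha]
        rw [ih (cs.length - (i + 1)) (by omega) _ _ rfl, hdropi, bLoop]
        rw [if_neg (by simp), if_neg (by tauto)]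
    · rw [if_pos (by simpa using hascii)]
      rw [ih (cs.length - (i + 1)) (by omega) _ _ rfl, hdropi, bLoop]
      rw [if_neg (by simp), if_neg (by tauto)]
  · rw [dif_neg h, List.drop_of_length_le (by omega), bLoop]
    simp

-- ===== VERDICT (by name: the statement is the Claim_ definition above) =====
theorem split_line_to_word_spec : Claim_equal_split_line_to_word := by
  intro line _
  unfold Spec_split_line_to_word split_line_to_word split_line_to_word_alt
  rw [aOuter_bLoop]
  rfl
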